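-- pv_equiv track=rewrite | github.com/lungen/Project_Euler | p26-reciprocal-cycles-51-03.py | dividor
-- ===== SOURCE A (Python) =====
-- def dividor(z, n, declist, loop=10):
--     if loop == 0:
--         return declist
--     else:
--         rest = (z % n) * 10
--         dec = z // n
--         declist += str(dec)
--
--         return dividor(rest, n, declist, loop - 1)
-- ===== SOURCE B (Python) =====
-- def dividor(z, n, declist, loop=10):
--     digits = []
--     r = z
--     for _ in range(loop):
--         q, r = divmod(r, n)
--         digits.append(str(q))
--         r *= 10
--     return declist + ''.join(digits)
-- ===== Notes on version B (the rewrite author's own statement) =====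
-- stated objective: idiomatic
-- what changed: Replaces the string-accumulating tail recursion by an iterative for-loop over range(loop) that collects each divmod quotient in a list and joins it onto declist once at the end.
import Mathlib
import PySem

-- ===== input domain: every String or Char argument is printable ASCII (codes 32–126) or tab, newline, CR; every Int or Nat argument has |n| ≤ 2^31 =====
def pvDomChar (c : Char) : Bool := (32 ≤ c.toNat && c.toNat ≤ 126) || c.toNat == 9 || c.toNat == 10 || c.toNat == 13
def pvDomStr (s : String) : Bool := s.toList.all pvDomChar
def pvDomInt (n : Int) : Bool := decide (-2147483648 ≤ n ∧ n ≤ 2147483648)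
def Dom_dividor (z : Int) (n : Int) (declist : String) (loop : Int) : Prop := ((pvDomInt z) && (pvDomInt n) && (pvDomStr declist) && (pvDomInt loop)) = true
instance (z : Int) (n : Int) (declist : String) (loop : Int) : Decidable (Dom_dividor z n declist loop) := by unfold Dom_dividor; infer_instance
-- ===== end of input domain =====

-- B replaces A's string-accumulating tail recursion by an iterative loop over range(loop)
-- collecting divmod quotients in a list joined once at the end (idiomatic; avoids re-copying the accumulator string each step).


-- ===== PORT A =====
-- A's tail recursion, fuel = loop (Pre_ restricts to 0 ≤ loop, where A terminates);
-- the string accumulator is carried as List Char (PySem.Int.toChars = str(dec)).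
def dividorGoA (z : Int) (n : Int) (acc : List Char) : Nat → List Char
  | 0 => acc
  | k + 1 =>
      dividorGoA ((PySem.Int.mod z n) * 10) n
        (acc ++ PySem.Int.toChars (PySem.Int.floordiv z n)) k

def dividor (z : Int) (n : Int) (declist : String) (loop : Int) : String :=
  String.ofList (dividorGoA z n declist.toList loop.toNat)

-- ===== PORT B =====
-- Source B: state (digits, r); each range step appends str(q) for (q, r) = divmod(r, n), r *= 10;
-- finally declist + ''.join(digits)  (PySem.Chars.join [] = ''.join on char lists).
def dividor_alt (z : Int) (n : Int) (declist : String) (loop : Int) : String :=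
  let step := fun (st : List (List Char) × Int) (_ : Int) =>
    (st.1 ++ [PySem.Int.toChars (PySem.Int.floordiv st.2 n)], (PySem.Int.mod st.2 n) * 10)
  let fin := (PySem.List.pyRange 0 loop 1).foldl step ([], z)
  String.ofList (declist.toList ++ PySem.Chars.join [] fin.1)

-- ===== PRECONDITION & SPEC =====
-- Pre_ excludes n = 0 with loop ≠ 0 (Python A raises ZeroDivisionError) and loop < 0
-- (Python A recurses without end and raises RecursionError; B would return declist there).
def Pre_dividor (z : Int) (n : Int) (declist : String) (loop : Int) : Prop :=
  0 ≤ loop ∧ (n ≠ 0 ∨ loop = 0)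
instance (z : Int) (n : Int) (declist : String) (loop : Int) : Decidable (Pre_dividor z n declist loop) := by unfold Pre_dividor; infer_instance

def pvWitness_dividor : Int × Int × String × Int := (1, 7, "0.", 10)

def Spec_dividor (z : Int) (n : Int) (declist : String) (loop : Int) (out : String) : Prop := out = dividor_alt z n declist loop
instance (z : Int) (n : Int) (declist : String) (loop : Int) (out : String) : Decidable (Spec_dividor z n declist loop out) := by unfold Spec_dividor; infer_instance

-- ===== CLAIM (what is proved, stated in full; the proofs are below) =====
def Claim_equal_dividor : Prop := ∀ (z : Int) (n : Int) (declist : String) (loop : Int), Dom_dividor z n declist loop → Pre_dividor z n declist loop → Spec_dividor z n declist loop (dividor z n declist loop)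

-- ===== LEMMAS AND PROOFS =====

-- the common digit stream of k long-division steps, as a list of digit strings
def digitsL (z : Int) (n : Int) : Nat → List (List Char)
  | 0 => []
  | k + 1 => PySem.Int.toChars (PySem.Int.floordiv z n) :: digitsL ((PySem.Int.mod z n) * 10) n k

theorem joinNil (l : List (List Char)) : PySem.Chars.join ([] : List Char) l = l.flatten := by
  induction l with
  | nil => simp [PySem.Chars.join_nil]
  | cons d rest ih =>
    cases rest with
    | nil => simp [PySem.Chars.join_singleton]
    | cons e r => simp [PySem.Chars.join_cons_cons] at ih ⊢; simpa using ih

theorem goA_eq (n : Int) (k : Nat) : ∀ (z : Int) (acc : List Char),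
    dividorGoA z n acc k = acc ++ (digitsL z n k).flatten := by
  induction k with
  | zero => intro z acc; simp [dividorGoA, digitsL]
  | succ k ih =>
      intro z acc
      simp [dividorGoA, digitsL, ih, List.append_assoc]

theorem foldB_fst (n : Int) (l : List Int) : ∀ (digits : List (List Char)) (r : Int),
    (l.foldl
        (fun (st : List (List Char) × Int) (_ : Int) =>
          (st.1 ++ [PySem.Int.toChars (PySem.Int.floordiv st.2 n)], (PySem.Int.mod st.2 n) * 10))
        (digits, r)).1
      = digits ++ digitsL r n l.length := by
  induction l with
  | nil => intro digits r; simp [digitsL]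
  | cons x xs ih =>
      intro digits r
      simp [List.foldl, ih, digitsL, List.append_assoc]

-- ===== VERDICT (by name: the statement is the Claim_ definition above) =====
theorem dividor_spec : Claim_equal_dividor := by
  intro z n declist loop _ _
  show String.ofList (dividorGoA z n declist.toList loop.toNat)
      = String.ofList (declist.toList ++ PySem.Chars.join []
          ((PySem.List.pyRange 0 loop 1).foldl
            (fun (st : List (List Char) × Int) (_ : Int) =>
              (st.1 ++ [PySem.Int.toChars (PySem.Int.floordiv st.2 n)], (PySem.Int.mod st.2 n) * 10))
            ([], z)).1)
  rw [foldB_fst n _ [] z, PySem.List.length_pyRange_one, List.nil_append, joinNil, goA_eq]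
  norm_num
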